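-- pv_equiv track=rewrite | github.com/OSU-slatelab/vp-pairwise | train.py | get_bucket
-- ===== SOURCE A (Python) =====
-- def get_bucket(epoch, a=2, b=3):
--     start = 0
--     while True:
--         for i in range(int(a)):
--             start+=1
--             if start == epoch:
--                 return True
--         for i in range(int(b)):
--             start+=1
--             if start == epoch:
--                 return False
-- ===== SOURCE B (Python) =====
-- def get_bucket(epoch, a=2, b=3):
--     a2 = max(int(a), 0)
--     b2 = max(int(b), 0)
--     return (epoch - 1) % (a2 + b2) < a2
-- ===== Notes on version B (the rewrite author's own statement) =====
-- stated objective: faster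
-- what changed: Replaced the unbounded counting loop over a/b-sized cycles with the O(1) closed form (epoch-1) % (max(a,0)+max(b,0)) < max(a,0).
import Mathlib
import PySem

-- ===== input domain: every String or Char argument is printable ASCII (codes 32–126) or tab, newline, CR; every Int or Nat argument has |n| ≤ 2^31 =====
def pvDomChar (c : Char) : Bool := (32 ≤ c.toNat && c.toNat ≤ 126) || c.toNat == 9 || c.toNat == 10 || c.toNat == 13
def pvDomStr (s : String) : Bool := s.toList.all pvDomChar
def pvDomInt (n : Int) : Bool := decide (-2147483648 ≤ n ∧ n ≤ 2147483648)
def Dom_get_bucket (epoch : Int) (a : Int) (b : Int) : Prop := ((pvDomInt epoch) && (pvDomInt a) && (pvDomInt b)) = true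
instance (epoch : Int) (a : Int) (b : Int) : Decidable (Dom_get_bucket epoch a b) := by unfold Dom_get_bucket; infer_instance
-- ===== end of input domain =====

-- B replaces A's unbounded counting loop by the O(1) closed form
-- (epoch-1) % (max(a,0)+max(b,0)) < max(a,0); equality proved on Pre_ (A returns there).

-- ===== PORT A =====
-- one 'for i in range(int(n))' body (k = number of remaining iterations):
-- start += 1; if start == epoch: return ret.
-- Sum.inl = fell through with the new start, Sum.inr = returned.
def pvForA (k : Nat) (start epoch : Int) (ret : Bool) : Int ⊕ Bool :=
  match k with
  | 0 => Sum.inl start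
  | k + 1 =>
    let s := start + 1
    if s = epoch then Sum.inr ret else pvForA k s epoch ret

-- the 'while True' loop; fuel bounds the number of cycles (A diverges where the
-- fuel would run out, i.e. outside Pre_get_bucket).
def pvWhileA (fuel : Nat) (start epoch a b : Int) : Bool :=
  match fuel with
  | 0 => false
  | fuel + 1 =>
    match pvForA a.toNat start epoch true with
    | Sum.inr r => r
    | Sum.inl s1 =>
      match pvForA b.toNat s1 epoch false with
      | Sum.inr r => r
      | Sum.inl s2 => pvWhileA fuel s2 epoch a b

def get_bucket (epoch : Int) (a : Int) (b : Int) : Bool :=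
  pvWhileA (epoch.toNat + 1) 0 epoch a b

-- ===== PORT B =====
def get_bucket_alt (epoch : Int) (a : Int) (b : Int) : Bool :=
  let a2 := max a 0
  let b2 := max b 0
  decide (PySem.Int.mod (epoch - 1) (a2 + b2) < a2)

-- ===== PRECONDITION & SPEC =====
-- Exactly where the Python A returns: epoch must be reached (epoch ≥ 1) and each
-- cycle must make progress (a ≥ 1 or b ≥ 1); otherwise A loops forever.
def Pre_get_bucket (epoch : Int) (a : Int) (b : Int) : Prop :=
  1 ≤ epoch ∧ (1 ≤ a ∨ 1 ≤ b)
instance (epoch : Int) (a : Int) (b : Int) : Decidable (Pre_get_bucket epoch a b) := by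
  unfold Pre_get_bucket; infer_instance

def pvWitness_get_bucket : Int × Int × Int := (7, 2, 3)

def Spec_get_bucket (epoch : Int) (a : Int) (b : Int) (out : Bool) : Prop := out = get_bucket_alt epoch a b
instance (epoch : Int) (a : Int) (b : Int) (out : Bool) : Decidable (Spec_get_bucket epoch a b out) := by unfold Spec_get_bucket; infer_instance

-- ===== CLAIM (what is proved, stated in full; the proofs are below) =====
def Claim_equal_get_bucket : Prop := ∀ (epoch : Int) (a : Int) (b : Int), Dom_get_bucket epoch a b → Pre_get_bucket epoch a b → Spec_get_bucket epoch a b (get_bucket epoch a b)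

-- ===== LEMMAS AND PROOFS =====

-- the inner for-loop only depends on the length of the range list
theorem pvForA_char (k : Nat) (start epoch : Int) (ret : Bool) :
    pvForA k start epoch ret =
      if start < epoch ∧ epoch ≤ start + (k : Int) then Sum.inr ret
      else Sum.inl (start + (k : Int)) := by
  induction k generalizing start with
  | zero => simp [pvForA]
  | succ k ih =>
    simp only [pvForA]
    rcases eq_or_ne (start + 1) epoch with h | h
    · rw [if_pos h, if_pos]; omega
    · rw [if_neg h, ih]
      by_cases hc : start + 1 < epoch ∧ epoch ≤ start + 1 + (k : Int)
      · rw [if_pos hc, if_pos]; omega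
      · rw [if_neg hc, if_neg]
        · congr 1; push_cast; ring
        · omega

theorem pvWhileA_char (fuel : Nat) (start epoch a b : Int)
    (hab : 1 ≤ a ∨ 1 ≤ b)
    (hs : start < epoch) (hf : (epoch - start).toNat ≤ fuel) :
    pvWhileA fuel start epoch a b =
      decide (PySem.Int.mod (epoch - start - 1) ((a.toNat : Int) + (b.toNat : Int)) < (a.toNat : Int)) := by
  induction fuel generalizing start with
  | zero => omega
  | succ fuel ih =>
    have hA : (0:Int) ≤ (a.toNat : Int) := by positivity
    have hB : (0:Int) ≤ (b.toNat : Int) := by positivity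
    have hAB : (1:Int) ≤ (a.toNat : Int) + (b.toNat : Int) := by omega
    rw [pvWhileA, pvForA_char]
    by_cases h1 : start < epoch ∧ epoch ≤ start + (a.toNat : Int)
    · rw [if_pos h1]
      show true = _
      have hmod : PySem.Int.mod (epoch - start - 1) ((a.toNat : Int) + (b.toNat : Int)) = epoch - start - 1 := by
        rw [PySem.Int.mod_eq_emod_of_pos (show (0:Int) < (a.toNat:Int)+(b.toNat:Int) by omega)]
        exact Int.emod_eq_of_lt (by omega) (by omega)
      rw [hmod]
      symm; rw [decide_eq_true_iff]; omega
    · rw [if_neg h1]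
      show (match pvForA b.toNat _ epoch false with
            | Sum.inr r => r
            | Sum.inl s2 => pvWhileA fuel s2 epoch a b) = _
      rw [pvForA_char]
      by_cases h2 : start + (a.toNat : Int) < epoch ∧
          epoch ≤ start + (a.toNat : Int) + (b.toNat : Int)
      · rw [if_pos h2]
        show false = _
        have hmod : PySem.Int.mod (epoch - start - 1) ((a.toNat : Int) + (b.toNat : Int)) = epoch - start - 1 := by
          rw [PySem.Int.mod_eq_emod_of_pos (show (0:Int) < (a.toNat:Int)+(b.toNat:Int) by omega)]
          exact Int.emod_eq_of_lt (by omega) (by omega)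
        rw [hmod]
        symm; rw [decide_eq_false_iff_not]; omega
      · rw [if_neg h2]
        show pvWhileA fuel (start + (a.toNat : Int) + (b.toNat : Int)) epoch a b = _
        rw [ih _ (by omega) (by omega)]
        rw [PySem.Int.mod_eq_emod_of_pos (show (0:Int) < (a.toNat:Int)+(b.toNat:Int) by omega), PySem.Int.mod_eq_emod_of_pos (show (0:Int) < (a.toNat:Int)+(b.toNat:Int) by omega)]
        congr 2
        have heq : epoch - start - 1 =
            (epoch - (start + (a.toNat : Int) + (b.toNat : Int)) - 1)
              + ((a.toNat : Int) + (b.toNat : Int)) * 1 := by omega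
        rw [heq, Int.add_mul_emod_self_left]

-- ===== VERDICT (by name: the statement is the Claim_ definition above) =====
theorem get_bucket_spec : Claim_equal_get_bucket := by
  intro epoch a b _hdom hpre
  obtain ⟨he, hab⟩ := hpre
  show get_bucket epoch a b = get_bucket_alt epoch a b
  unfold get_bucket get_bucket_alt
  rw [pvWhileA_char _ _ _ _ _ hab (by omega) (by omega)]
  have ha2 : max a 0 = (a.toNat : Int) := by omega
  have hb2 : max b 0 = (b.toNat : Int) := by omega
  simp only [ha2, hb2, sub_zero]
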